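-- pv_equiv track=rewrite | github.com/isilcala/moonraker-owl | moonraker_owl/telemetry.py | build_subscription_manifest
-- ===== SOURCE A (Python) =====
-- from typing import Any, Dict, Iterable, Optional, Protocol, Union, List
--
-- def is_heater_object(obj_name: str) -> bool:
--     """Check if an object name represents a heater (extruder, bed, or generic heater).
--
--     Args:
--         obj_name: Moonraker object name (e.g., "extruder", "heater_bed", "heater_generic chamber")
--
--     Returns:
--         True if the object is a heater, False otherwise
--
--     Examples:
--         >>> is_heater_object("extruder")
--         True
--         >>> is_heater_object("extruder1")
--         True
--         >>> is_heater_object("heater_bed")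
--         True
--         >>> is_heater_object("heater_generic chamber")
--         True
--         >>> is_heater_object("fan")
--         False
--     """
--     return obj_name in ("extruder", "heater_bed") or obj_name.startswith(
--         ("extruder", "heater_generic")
--     )
--
-- def build_subscription_manifest(
--     include_fields: Iterable[str], exclude_fields: Iterable[str]
-- ) -> dict[str, Optional[list[str]]]:
--     excluded_objects = {
--         _normalise_field(field)
--         for field in exclude_fields
--         if field and "." not in field and "*" not in field
--     }
--
--     subscribe_all: set[str] = set()
--     attribute_map: dict[str, set[str]] = {}
--
--     for field in include_fields:
--         field = _normalise_field(field)
--         if not field: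
--             continue
--
--         base, has_dot, attribute = field.partition(".")
--         base = base.strip()
--         if not base or base in excluded_objects:
--             continue
--
--         if not has_dot:
--             subscribe_all.add(base)
--             continue
--
--         attribute = attribute.strip()
--         if not attribute:
--             subscribe_all.add(base)
--             continue
--
--         attribute_map.setdefault(base, set()).add(attribute)
--
--     objects: dict[str, Optional[list[str]]] = {}
--     for base in sorted(subscribe_all | attribute_map.keys()):
--         if base in subscribe_all:
--             # For heater objects (extruder, heater_bed), explicitly subscribe to temperature AND target fields
--             # to ensure we always get both values in every update, avoiding race conditions
--             # where target may be omitted in rapid temperature updates.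
--             # Temperature sensors don't have target, so subscribe to all their fields.
--             if is_heater_object(base):
--                 objects[base] = ["temperature", "target"]
--             else:
--                 objects[base] = None
--         else:
--             # If specific attributes were requested, ensure heaters always include both temp fields
--             attrs = attribute_map.get(base, set())
--             if is_heater_object(base):
--                 attrs = attrs | {"temperature", "target"}
--             objects[base] = sorted(attrs)
--
--     return objects
--
-- def _normalise_field(field: str) -> str:
--     field = field.strip()
--     if len(field) >= 2 and field[0] == field[-1] and field[0] in {'"', "'"}:
--         field = field[1:-1].strip()
--     return field
-- ===== SOURCE B (Python) =====
-- from typing import Iterable, Optional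
--
--
-- def is_heater_object(obj_name: str) -> bool:
--     return obj_name in ("extruder", "heater_bed") or obj_name.startswith(
--         ("extruder", "heater_generic")
--     )
--
--
-- def _normalise_field(field: str) -> str:
--     field = field.strip()
--     if len(field) >= 2 and field[0] == field[-1] and field[0] in {'"', "'"}:
--         field = field[1:-1].strip()
--     return field
--
--
-- def build_subscription_manifest(
--     include_fields: Iterable[str], exclude_fields: Iterable[str]
-- ) -> dict[str, Optional[list[str]]]:
--     excluded = {
--         _normalise_field(field)
--         for field in exclude_fields
--         if field and "." not in field and "*" not in field
--     }
--
--     # Sort-then-scan: parse every include field into a (base, attribute) pair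
--     # (attribute None = whole-object request, covering "base" and "base."),
--     # sort the pairs by base, and emit one output row per run of equal bases.
--     pairs: list[tuple[str, Optional[str]]] = []
--     for field in include_fields:
--         field = _normalise_field(field)
--         base, has_dot, attribute = field.partition(".")
--         base = base.strip()
--         attribute = attribute.strip()
--         if base and base not in excluded:
--             pairs.append((base, attribute if has_dot and attribute else None))
--     pairs.sort(key=lambda p: p[0])
--
--     result: dict[str, Optional[list[str]]] = {}
--     i, n = 0, len(pairs)
--     while i < n:
--         base = pairs[i][0]
--         whole = False
--         attrs: set[str] = set()
--         while i < n and pairs[i][0] == base: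
--             a = pairs[i][1]
--             if a is None:
--                 whole = True
--             else:
--                 attrs.add(a)
--             i += 1
--         if whole:
--             result[base] = ["temperature", "target"] if is_heater_object(base) else None
--         else:
--             if is_heater_object(base):
--                 attrs |= {"temperature", "target"}
--             result[base] = sorted(attrs)
--     return result
-- ===== Notes on version B (the rewrite author's own statement) =====
-- stated objective: alternative
-- what changed: B replaces A's hash-accumulator design (a subscribe-all set plus a dict of per-base attribute sets, merged by a final sorted union of keys) with sort-then-scan: it parses each include field into a (base, attribute-or-None) pair, sorts the pairs by base, and emits one output row per run of equal bases in a single linear scan with no grouping dict.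
import Mathlib
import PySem

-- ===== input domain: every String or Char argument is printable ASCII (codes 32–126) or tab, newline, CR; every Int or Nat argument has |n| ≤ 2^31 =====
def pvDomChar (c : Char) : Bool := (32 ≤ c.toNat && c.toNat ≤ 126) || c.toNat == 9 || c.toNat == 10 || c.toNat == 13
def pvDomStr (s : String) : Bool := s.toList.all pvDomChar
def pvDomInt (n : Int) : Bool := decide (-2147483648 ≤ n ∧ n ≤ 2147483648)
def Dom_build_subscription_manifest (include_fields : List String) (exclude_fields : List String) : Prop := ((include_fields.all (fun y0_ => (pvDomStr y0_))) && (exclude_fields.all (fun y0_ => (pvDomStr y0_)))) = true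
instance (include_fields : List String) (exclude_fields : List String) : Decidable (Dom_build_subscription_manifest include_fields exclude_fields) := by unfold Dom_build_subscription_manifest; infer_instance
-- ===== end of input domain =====

-- B replaces A's hash-accumulator design (subscribe-all set + per-base attribute-set dict,
-- merged by a final sorted union of keys) by sort-then-scan: parse each include field into a
-- (base, attribute-or-None) pair, sort the pairs by base, and emit one output row per run of
-- equal bases in a single linear scan; same return value (alternative).

-- ===== PORT A =====
-- is_heater_object (shared by both Python sources)
def pvIsHeater (obj_name : String) : Bool :=
  (obj_name == "extruder" || obj_name == "heater_bed") ||
    (PySem.Str.startswith obj_name "extruder" || PySem.Str.startswith obj_name "heater_generic")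

-- _normalise_field (shared by both Python sources); field[1:-1] is the slice 1:-1
def pvNormalise (field : String) : String :=
  let cs := PySem.Chars.strip field.toList
  if 2 ≤ cs.length && (cs.headD ' ' == cs.getLastD ' ') && (cs.headD ' ' == '"' || cs.headD ' ' == '\'') then
    String.mk (PySem.Chars.strip (PySem.List.slice cs (some 1) (some (-1))))
  else String.mk cs

-- hand port of field.partition("."): split at the FIRST '.' (exact: sep is one char; find
-- gives the first index or -1); returns (before, sep-found?, after)
def pvPartition (s : String) : String × Bool × String :=
  let cs := s.toList
  let i := PySem.Chars.find cs ['.']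
  if i == -1 then (s, false, "")
  else (String.mk (cs.take i.toNat), true, String.mk (cs.drop (i.toNat + 1)))

-- the excluded_objects set comprehension (identical line in both Python sources)
def pvExcluded (exclude_fields : List String) : PySem.Set String :=
  PySem.Set.ofList
    ((exclude_fields.filter
        (fun f => !(f == "") && !(PySem.Str.isIn "." f) && !(PySem.Str.isIn "*" f))).map pvNormalise)

-- loop body of A's `for field in include_fields` (state = (subscribe_all, attribute_map))
def pvStepA (excluded : PySem.Set String)
    (st : PySem.Set String × PySem.Dict String (PySem.Set String)) (field0 : String) :
    PySem.Set String × PySem.Dict String (PySem.Set String) :=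
  if pvNormalise field0 == "" then st
  else if PySem.Str.strip (pvPartition (pvNormalise field0)).1 == "" ||
      PySem.Set.contains excluded (PySem.Str.strip (pvPartition (pvNormalise field0)).1) then st
  else if !(pvPartition (pvNormalise field0)).2.1 then
    (PySem.Set.add st.1 (PySem.Str.strip (pvPartition (pvNormalise field0)).1), st.2)
  else if PySem.Str.strip (pvPartition (pvNormalise field0)).2.2 == "" then
    (PySem.Set.add st.1 (PySem.Str.strip (pvPartition (pvNormalise field0)).1), st.2)
  else
    -- attribute_map.setdefault(base, set()).add(attribute): in-place update = modify
    (st.1, st.2.modify (PySem.Str.strip (pvPartition (pvNormalise field0)).1) PySem.Set.empty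
      (fun s => PySem.Set.add s (PySem.Str.strip (pvPartition (pvNormalise field0)).2.2)))

def build_subscription_manifest (include_fields : List String) (exclude_fields : List String) : List (String × Option (List String)) :=
  let excluded_objects := pvExcluded exclude_fields
  let st := include_fields.foldl (pvStepA excluded_objects) (PySem.Set.empty, PySem.Dict.empty)
  let bases := PySem.List.sorted (PySem.Set.union st.1 st.2.keys) (fun x => x) false
  (bases.foldl
    (fun (d : PySem.Dict String (Option (List String))) base =>
      if PySem.Set.contains st.1 base then
        if pvIsHeater base then d.insert base (some ["temperature", "target"])
        else d.insert base none
      else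
        let attrs := st.2.getD base PySem.Set.empty
        let attrs := if pvIsHeater base then PySem.Set.union attrs ["temperature", "target"] else attrs
        d.insert base (some (PySem.List.sorted attrs (fun x => x) false)))
    PySem.Dict.empty).items

-- ===== PORT B =====
-- loop body of B's parsing pass: one (base, attribute) pair per accepted field,
-- attribute = none for a whole-object request ("base" without dot, or "base.")
def pvParseB (excluded : PySem.Set String)
    (ps : List (String × Option String)) (field0 : String) : List (String × Option String) :=
  if !(PySem.Str.strip (pvPartition (pvNormalise field0)).1 == "") &&
      !(PySem.Set.contains excluded (PySem.Str.strip (pvPartition (pvNormalise field0)).1)) then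
    ps ++ [(PySem.Str.strip (pvPartition (pvNormalise field0)).1,
      if (pvPartition (pvNormalise field0)).2.1 &&
          !(PySem.Str.strip (pvPartition (pvNormalise field0)).2.2 == "") then
        some (PySem.Str.strip (pvPartition (pvNormalise field0)).2.2)
      else none)]
  else ps

-- B's while loop: one output row per run of equal bases in the sorted pair list
def pvLoopB (res : PySem.Dict String (Option (List String))) :
    List (String × Option String) → PySem.Dict String (Option (List String))
  | [] => res
  | p :: rest =>
    let vals := p.2 :: (rest.takeWhile (fun q => q.1 == p.1)).map Prod.snd
    let res' :=
      if vals.any (fun a => a.isNone) then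
        res.insert p.1 (if pvIsHeater p.1 then some ["temperature", "target"] else none)
      else
        let attrs := PySem.Set.ofList (vals.filterMap id)
        let attrs := if pvIsHeater p.1 then PySem.Set.union attrs ["temperature", "target"] else attrs
        res.insert p.1 (some (PySem.List.sorted attrs (fun x => x) false))
    pvLoopB res' (rest.dropWhile (fun q => q.1 == p.1))
termination_by l => l.length
decreasing_by
  simpa using Nat.lt_succ_of_le (List.length_dropWhile_le _ _)

def build_subscription_manifest_alt (include_fields : List String) (exclude_fields : List String) : List (String × Option (List String)) :=
  let excluded := pvExcluded exclude_fields
  let pairs := include_fields.foldl (pvParseB excluded) []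
  let sortedPairs := PySem.List.sorted pairs (fun p => p.1) false
  (pvLoopB PySem.Dict.empty sortedPairs).items

-- ===== PRECONDITION & SPEC =====
def Spec_build_subscription_manifest (include_fields : List String) (exclude_fields : List String) (out : List (String × Option (List String))) : Prop := out = build_subscription_manifest_alt include_fields exclude_fields
instance (include_fields : List String) (exclude_fields : List String) (out : List (String × Option (List String))) : Decidable (Spec_build_subscription_manifest include_fields exclude_fields out) := by unfold Spec_build_subscription_manifest; infer_instance

-- ===== CLAIM (what is proved, stated in full; the proofs are below) =====
def Claim_equal_build_subscription_manifest : Prop := ∀ (include_fields : List String) (exclude_fields : List String), Dom_build_subscription_manifest include_fields exclude_fields → Spec_build_subscription_manifest include_fields exclude_fields (build_subscription_manifest include_fields exclude_fields)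

-- ===== LEMMAS AND PROOFS =====

-- whole-object predicate and per-base attribute list, named for the proofs
def pvWholeP (b : String) (e : String × Option String) : Bool := e.1 == b && e.2.isNone
def pvAttrs (l : List (String × Option String)) (b : String) : List String :=
  (l.filter (fun e => e.1 == b)).filterMap Prod.snd

-- the value B emits for base b, computed from the whole pair list
def pvEmit (l : List (String × Option String)) (b : String) : Option (List String) :=
  if (l.filter (fun e => e.1 == b)).any (fun e => e.2.isNone) then
    (if pvIsHeater b then some ["temperature", "target"] else none)
  else
    let attrs := PySem.Set.ofList (pvAttrs l b)
    let attrs := if pvIsHeater b then PySem.Set.union attrs ["temperature", "target"] else attrs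
    some (PySem.List.sorted attrs (fun x => x) false)

-- the sequence of run-head bases B's scan visits
def pvRunBases : List (String × Option String) → List String
  | [] => []
  | p :: rest => p.1 :: pvRunBases (rest.dropWhile (fun q => q.1 == p.1))
termination_by l => l.length
decreasing_by
  simpa using Nat.lt_succ_of_le (List.length_dropWhile_le _ _)

-- the coupling invariant between A's state and B's pair list
def pvInv (sub : PySem.Set String) (am : PySem.Dict String (PySem.Set String))
    (pairs : List (String × Option String)) : Prop :=
  (∀ b, b ∈ sub ↔ pairs.any (pvWholeP b) = true) ∧
  (∀ b, am.getD b PySem.Set.empty = PySem.Set.ofList (pvAttrs pairs b)) ∧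
  (∀ b, (b ∈ sub ∨ b ∈ am.keys) ↔ b ∈ pairs.map Prod.fst) ∧
  sub.Nodup ∧ am.keys.Nodup

lemma pvInv_whole (sub : PySem.Set String) (am : PySem.Dict String (PySem.Set String))
    (pairs : List (String × Option String)) (base : String)
    (h : pvInv sub am pairs) :
    pvInv (PySem.Set.add sub base) am (pairs ++ [(base, none)]) := by
  obtain ⟨h1, h2, h3, h4, h5⟩ := h
  refine ⟨?_, ?_, ?_, PySem.Set.nodup_add _ _ h4, h5⟩
  · intro b
    rw [PySem.Set.mem_add, h1 b]
    simp only [List.any_append, List.any_cons, List.any_nil, pvWholeP, Bool.or_eq_true,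
      Bool.and_eq_true, beq_iff_eq, Option.isNone_none, Bool.or_false]
    constructor
    · rintro (hb | rfl)
      · exact Or.inl hb
      · exact Or.inr ⟨rfl, trivial⟩
    · rintro (hb | ⟨rfl, -⟩)
      · exact Or.inl hb
      · exact Or.inr rfl
  · intro b
    have he : pvAttrs (pairs ++ [(base, none)]) b = pvAttrs pairs b := by
      by_cases hb : base = b <;> simp [pvAttrs, List.filter_append, hb]
    rw [he]; exact h2 b
  · intro b
    rw [PySem.Set.mem_add]
    have := h3 b
    simp only [List.map_append, List.mem_append, List.map_cons, List.map_nil,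
      List.mem_cons, List.not_mem_nil, or_false]
    tauto

lemma pvInv_attr (sub : PySem.Set String) (am : PySem.Dict String (PySem.Set String))
    (pairs : List (String × Option String)) (base a : String)
    (h : pvInv sub am pairs) :
    pvInv sub (am.modify base PySem.Set.empty (fun s => PySem.Set.add s a))
      (pairs ++ [(base, some a)]) := by
  obtain ⟨h1, h2, h3, h4, h5⟩ := h
  have hkeys := PySem.Dict.keys_modify am base PySem.Set.empty (fun s => PySem.Set.add s a)
  refine ⟨?_, ?_, ?_, h4, ?_⟩
  · intro b
    rw [h1 b]
    simp [pvWholeP]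
  · intro b
    rw [PySem.Dict.getD_modify]
    by_cases hb : b = base
    · subst hb
      rw [if_pos rfl, h2 b]
      have he : pvAttrs (pairs ++ [(b, some a)]) b = pvAttrs pairs b ++ [a] := by
        simp [pvAttrs, List.filter_append]
      rw [he, PySem.Set.ofList_eq_foldl, PySem.Set.ofList_eq_foldl, List.foldl_append]
      rfl
    · rw [if_neg hb]
      have he : pvAttrs (pairs ++ [(base, some a)]) b = pvAttrs pairs b := by
        have hne : (((base, some a) : String × Option String).1 == b) = false := by
          simp only [beq_eq_false_iff_ne]; exact fun hx => hb hx.symm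
        simp [pvAttrs, List.filter_append, hne]
      rw [he]; exact h2 b
  · intro b
    rw [hkeys]
    have := h3 b
    simp only [PySem.Dict.mem_keys_insert, List.map_append, List.mem_append, List.map_cons,
      List.map_nil, List.mem_cons, List.not_mem_nil, or_false]
    tauto
  · rw [hkeys]; exact PySem.Dict.nodup_keys_insert _ _ _ h5

lemma pvStep_inv (excluded : PySem.Set String) (f : String)
    (sub : PySem.Set String) (am : PySem.Dict String (PySem.Set String))
    (pairs : List (String × Option String)) (h : pvInv sub am pairs) :
    pvInv (pvStepA excluded (sub, am) f).1 (pvStepA excluded (sub, am) f).2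
      (pvParseB excluded pairs f) := by
  by_cases hb : PySem.Str.strip (pvPartition (pvNormalise f)).1 = "" ∨
      PySem.Str.strip (pvPartition (pvNormalise f)).1 ∈ excluded
  · have hB : (!(PySem.Str.strip (pvPartition (pvNormalise f)).1 == "") &&
        !(PySem.Set.contains excluded (PySem.Str.strip (pvPartition (pvNormalise f)).1))) = false := by
      rcases hb with hb | hb
      · simp [hb]
      · simp [PySem.Set.contains_iff, hb]
    have eB : pvParseB excluded pairs f = pairs := by
      unfold pvParseB; rw [hB]; rfl
    by_cases hf : pvNormalise f = ""
    · have eA : pvStepA excluded (sub, am) f = (sub, am) := by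
        unfold pvStepA; rw [hf]; rfl
      rw [eA, eB]; exact h
    · have hf' : (pvNormalise f == "") = false := by simp [hf]
      have hA : (PySem.Str.strip (pvPartition (pvNormalise f)).1 == "" ||
          PySem.Set.contains excluded (PySem.Str.strip (pvPartition (pvNormalise f)).1)) = true := by
        rcases hb with hb | hb
        · simp [hb]
        · simp [PySem.Set.contains_iff, hb]
      have eA : pvStepA excluded (sub, am) f = (sub, am) := by
        unfold pvStepA; rw [hA, hf']; rfl
      rw [eA, eB]; exact h
  · rw [not_or] at hb
    have hf : ¬ pvNormalise f = "" := by
      intro hf; apply hb.1; rw [hf]; rfl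
    have hf' : (pvNormalise f == "") = false := by simp [hf]
    have hA : (PySem.Str.strip (pvPartition (pvNormalise f)).1 == "" ||
        PySem.Set.contains excluded (PySem.Str.strip (pvPartition (pvNormalise f)).1)) = false := by
      simp [hb.1, PySem.Set.contains_iff, hb.2]
    have hB : (!(PySem.Str.strip (pvPartition (pvNormalise f)).1 == "") &&
        !(PySem.Set.contains excluded (PySem.Str.strip (pvPartition (pvNormalise f)).1))) = true := by
      simp [hb.1, PySem.Set.contains_iff, hb.2]
    by_cases hd : (pvPartition (pvNormalise f)).2.1 = true
    · by_cases ha : PySem.Str.strip (pvPartition (pvNormalise f)).2.2 = ""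
      · have ha' : (PySem.Str.strip (pvPartition (pvNormalise f)).2.2 == "") = true := by simp [ha]
        have eA : pvStepA excluded (sub, am) f =
            (PySem.Set.add sub (PySem.Str.strip (pvPartition (pvNormalise f)).1), am) := by
          unfold pvStepA; rw [hA, hf', hd, ha']; rfl
        have eB : pvParseB excluded pairs f =
            pairs ++ [(PySem.Str.strip (pvPartition (pvNormalise f)).1, none)] := by
          unfold pvParseB; rw [hB, hd, ha']; rfl
        rw [eA, eB]
        exact pvInv_whole _ _ _ _ h
      · have ha' : (PySem.Str.strip (pvPartition (pvNormalise f)).2.2 == "") = false := by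
          simp [ha]
        have eA : pvStepA excluded (sub, am) f =
            (sub, am.modify (PySem.Str.strip (pvPartition (pvNormalise f)).1) PySem.Set.empty
              (fun s => PySem.Set.add s (PySem.Str.strip (pvPartition (pvNormalise f)).2.2))) := by
          unfold pvStepA; rw [hA, hf', hd, ha']; rfl
        have eB : pvParseB excluded pairs f =
            pairs ++ [(PySem.Str.strip (pvPartition (pvNormalise f)).1,
              some (PySem.Str.strip (pvPartition (pvNormalise f)).2.2))] := by
          unfold pvParseB; rw [hB, hd, ha']; rfl
        rw [eA, eB]
        exact pvInv_attr _ _ _ _ _ h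
    · have hd' : (pvPartition (pvNormalise f)).2.1 = false := by simpa using hd
      have eA : pvStepA excluded (sub, am) f =
          (PySem.Set.add sub (PySem.Str.strip (pvPartition (pvNormalise f)).1), am) := by
        unfold pvStepA; rw [hA, hf', hd']; rfl
      have eB : pvParseB excluded pairs f =
          pairs ++ [(PySem.Str.strip (pvPartition (pvNormalise f)).1, none)] := by
        unfold pvParseB; rw [hB, hd']; rfl
      rw [eA, eB]
      exact pvInv_whole _ _ _ _ h

lemma pvFold_inv (excluded : PySem.Set String) (l : List String) :
    ∀ sub am pairs, pvInv sub am pairs →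
      pvInv (l.foldl (pvStepA excluded) (sub, am)).1 (l.foldl (pvStepA excluded) (sub, am)).2
        (l.foldl (pvParseB excluded) pairs) := by
  induction l with
  | nil => intro sub am pairs h; exact h
  | cons a t ih =>
      intro sub am pairs h
      have := ih (pvStepA excluded (sub, am) a).1 (pvStepA excluded (sub, am) a).2
        (pvParseB excluded pairs a) (pvStep_inv excluded a sub am pairs h)
      simpa using this

lemma pvInv_init : pvInv PySem.Set.empty PySem.Dict.empty [] := by
  refine ⟨?_, ?_, ?_, List.nodup_nil, ?_⟩
  · intro b; simp [PySem.Set.empty]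
  · intro b; rfl
  · intro b; simp [PySem.Set.empty, PySem.Dict.empty, PySem.Dict.keys]
  · simp [PySem.Dict.empty, PySem.Dict.keys]

-- for a key-sorted list whose keys all dominate k, the initial run of key-k elements
-- is exactly the key-k elements, and what remains is exactly the rest
lemma pv_tw_filter (k : String) :
    ∀ (rest : List (String × Option String)),
      rest.Pairwise (fun a b => a.1 ≤ b.1) → (∀ y ∈ rest, k ≤ y.1) →
      rest.takeWhile (fun q => q.1 == k) = rest.filter (fun q => q.1 == k)
        ∧ rest.dropWhile (fun q => q.1 == k) = rest.filter (fun q => !(q.1 == k)) := by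
  intro rest
  induction rest with
  | nil => intro _ _; exact ⟨rfl, rfl⟩
  | cons q t ih =>
      intro hpw hge
      rw [List.pairwise_cons] at hpw
      by_cases hq : q.1 = k
      · have hq' : (q.1 == k) = true := by simp [hq]
        have ht := ih hpw.2 (fun y hy => le_trans (hge q (by simp)) (hpw.1 y hy))
        refine ⟨?_, ?_⟩ <;>
          simp [List.takeWhile_cons, List.dropWhile_cons, List.filter_cons, hq', ht.1, ht.2]
      · have hq' : (q.1 == k) = false := by simp [hq]
        have hlt : k < q.1 := lt_of_le_of_ne (hge q (by simp)) (fun h => hq h.symm)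
        have hall : ∀ y ∈ t, ¬ (y.1 = k) := by
          intro y hy hk
          exact absurd (lt_of_lt_of_le hlt (hpw.1 y hy)) (by rw [hk]; exact lt_irrefl k)
        constructor
        · simp only [List.takeWhile_cons, hq', List.filter_cons]
          rw [List.filter_eq_nil_iff.mpr (fun y hy => by simp [hall y hy])]
          simp
        · simp only [List.dropWhile_cons, hq', List.filter_cons]
          rw [List.filter_eq_self.mpr (fun y hy => by simp [hall y hy])]
          simp

lemma pv_dropWhile_gt (k : String) :
    ∀ (rest : List (String × Option String)),
      rest.Pairwise (fun a b => a.1 ≤ b.1) → (∀ y ∈ rest, k ≤ y.1) →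
      ∀ x ∈ rest.dropWhile (fun q => q.1 == k), k < x.1 := by
  intro rest
  induction rest with
  | nil => intro _ _ x hx; simp at hx
  | cons q t ih =>
      intro hpw hge x hx
      rw [List.pairwise_cons] at hpw
      by_cases hq : q.1 = k
      · have hq' : (q.1 == k) = true := by simp [hq]
        rw [List.dropWhile_cons, hq'] at hx
        exact ih hpw.2 (fun y hy => le_trans (hge q (by simp)) (hpw.1 y hy)) x hx
      · have hq' : (q.1 == k) = false := by simp [hq]
        rw [List.dropWhile_cons] at hx
        simp only [hq', Bool.false_eq_true, if_false, List.mem_cons] at hx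
        have hlt : k < q.1 := lt_of_le_of_ne (hge q (by simp)) (fun h => hq h.symm)
        rcases hx with rfl | hx
        · exact hlt
        · exact lt_of_lt_of_le hlt (hpw.1 x hx)

lemma pvRunBases_mem (b : String) :
    ∀ (l : List (String × Option String)), b ∈ pvRunBases l ↔ b ∈ l.map Prod.fst := by
  intro l
  induction l using pvRunBases.induct with
  | case1 => simp [pvRunBases]
  | case2 p rest ih =>
      rw [pvRunBases]
      simp only [List.mem_cons, List.map_cons]
      constructor
      · rintro (rfl | hb)
        · simp
        · rcases List.mem_map.mp (ih.mp hb) with ⟨e, he, rfl⟩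
          exact Or.inr (List.mem_map_of_mem
            ((rest.dropWhile_sublist (p := fun q => q.1 == p.1)).mem he))
      · intro hb
        rcases hb with hb | hb
        · exact Or.inl hb
        · rcases List.mem_map.mp hb with ⟨e, he, rfl⟩
          rw [← rest.takeWhile_append_dropWhile (p := fun q => q.1 == p.1)] at he
          rcases List.mem_append.mp he with he | he
          · have := List.mem_takeWhile_imp he
            simp only [beq_iff_eq] at this
            exact Or.inl this
          · exact Or.inr (ih.mpr (List.mem_map_of_mem he))

lemma pvRunBases_pairwise :
    ∀ (l : List (String × Option String)), l.Pairwise (fun a b => a.1 ≤ b.1) →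
      (pvRunBases l).Pairwise (fun a b => a < b) := by
  intro l
  induction l using pvRunBases.induct with
  | case1 => intro _; simp [pvRunBases]
  | case2 p rest ih =>
      intro hpw
      rw [List.pairwise_cons] at hpw
      rw [pvRunBases, List.pairwise_cons]
      have hsub : (rest.dropWhile (fun q => q.1 == p.1)).Sublist rest := List.dropWhile_sublist _
      refine ⟨?_, ih (hpw.2.sublist hsub)⟩
      intro b hb
      rcases List.mem_map.mp ((pvRunBases_mem b _).mp hb) with ⟨e, he, rfl⟩
      exact pv_dropWhile_gt p.1 rest hpw.2 hpw.1 e he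

lemma pvLoopB_eq :
    ∀ (l : List (String × Option String)), l.Pairwise (fun a b => a.1 ≤ b.1) →
      ∀ res, pvLoopB res l = (pvRunBases l).foldl (fun d b => d.insert b (pvEmit l b)) res := by
  intro l
  induction l using pvRunBases.induct with
  | case1 => intro _ res; simp [pvLoopB, pvRunBases]
  | case2 p rest ih =>
      intro hpw res
      rw [List.pairwise_cons] at hpw
      have htw := pv_tw_filter p.1 rest hpw.2 hpw.1
      -- the run is exactly the key-p.1 elements of the whole list
      have hfl : (p :: rest).filter (fun q => q.1 == p.1) =
          p :: rest.takeWhile (fun q => q.1 == p.1) := by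
        rw [List.filter_cons, if_pos (by simp)]
        rw [htw.1]
      -- the emitted value is pvEmit of the whole list
      have hval : (if (p.2 :: (rest.takeWhile (fun q => q.1 == p.1)).map Prod.snd).any
            (fun a => a.isNone) then
          res.insert p.1 (if pvIsHeater p.1 then some ["temperature", "target"] else none)
        else
          res.insert p.1 (some (PySem.List.sorted
            (if pvIsHeater p.1 then
              PySem.Set.union (PySem.Set.ofList
                ((p.2 :: (rest.takeWhile (fun q => q.1 == p.1)).map Prod.snd).filterMap id))
                ["temperature", "target"]
             else PySem.Set.ofList
                ((p.2 :: (rest.takeWhile (fun q => q.1 == p.1)).map Prod.snd).filterMap id))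
            (fun x => x) false))) = res.insert p.1 (pvEmit (p :: rest) p.1) := by
        have hvals : p.2 :: (rest.takeWhile (fun q => q.1 == p.1)).map Prod.snd =
            ((p :: rest).filter (fun q => q.1 == p.1)).map Prod.snd := by
          rw [hfl]; rfl
        rw [hvals]
        simp only [pvEmit, pvAttrs, List.any_map, List.filterMap_map, Function.comp]
        have h1' : ((fun (a : Option String) => a.isNone) ∘ Prod.snd)
            = (fun (e : String × Option String) => e.2.isNone) := rfl
        have h2' : (fun (x : String × Option String) => id x.2)
            = (Prod.snd : String × Option String → Option String) := rfl
        rw [h1', h2']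
        split_ifs <;> rfl
      -- pvEmit over the tail equals pvEmit over the whole list on the tail's bases
      have hcongr : ∀ b, b ∈ pvRunBases (rest.dropWhile (fun q => q.1 == p.1)) →
          pvEmit (rest.dropWhile (fun q => q.1 == p.1)) b = pvEmit (p :: rest) b := by
        intro b hb
        have hlt : p.1 < b := by
          rcases List.mem_map.mp ((pvRunBases_mem b _).mp hb) with ⟨e, he, rfl⟩
          exact pv_dropWhile_gt p.1 rest hpw.2 hpw.1 e he
        have hfilter : (p :: rest).filter (fun q => q.1 == b) =
            (rest.dropWhile (fun q => q.1 == p.1)).filter (fun q => q.1 == b) := by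
          rw [htw.2, List.filter_filter]
          rw [List.filter_cons, if_neg (by simp; exact fun h => absurd h (ne_of_gt hlt).symm)]
          apply List.filter_congr
          intro x _
          by_cases hx : x.1 = b
          · simp [hx, ne_of_gt hlt]
          · simp [hx]
        unfold pvEmit pvAttrs
        rw [hfilter]
      have hstep : pvLoopB res (p :: rest) =
          pvLoopB (res.insert p.1 (pvEmit (p :: rest) p.1))
            (rest.dropWhile (fun q => q.1 == p.1)) := by
        rw [pvLoopB]
        exact congrArg (fun r => pvLoopB r (rest.dropWhile (fun q => q.1 == p.1))) hval
      rw [hstep, ih (hpw.2.sublist (List.dropWhile_sublist _)), pvRunBases, List.foldl_cons]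
      exact PySem.List.foldl_congr_mem _ _ _ _ (fun acc x hx => by rw [hcongr x hx])

-- ===== VERDICT (by name: the statement is the Claim_ definition above) =====
theorem build_subscription_manifest_spec : Claim_equal_build_subscription_manifest := by
  intro inc exc _
  show build_subscription_manifest inc exc = build_subscription_manifest_alt inc exc
  obtain ⟨h1, h2, h3, h4, h5⟩ :=
    pvFold_inv (pvExcluded exc) inc PySem.Set.empty PySem.Dict.empty [] pvInv_init
  unfold build_subscription_manifest build_subscription_manifest_alt
  set st := inc.foldl (pvStepA (pvExcluded exc)) (PySem.Set.empty, PySem.Dict.empty) with hst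
  set pairs := inc.foldl (pvParseB (pvExcluded exc)) [] with hpairs
  set l := PySem.List.sorted pairs (fun p => p.1) false with hl
  have hperm : l.Perm pairs := PySem.List.sorted_perm _ _ _
  have hpw : l.Pairwise (fun a b => a.1 ≤ b.1) := PySem.List.sorted_pairwise _ _
  have hrunnd : (pvRunBases l).Nodup :=
    (pvRunBases_pairwise l hpw).imp (fun h => ne_of_lt h)
  have hbases : PySem.List.sorted (PySem.Set.union st.1 st.2.keys) (fun x => x) false
      = pvRunBases l := by
    apply PySem.List.sorted_eq_of_perm_of_pairwise_lt
    · rw [List.perm_ext_iff_of_nodup hrunnd (PySem.Set.nodup_union _ _ h4)]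
      intro b
      rw [pvRunBases_mem, PySem.Set.mem_union, (hperm.map Prod.fst).mem_iff]
      exact (h3 b).symm
    · exact pvRunBases_pairwise l hpw
  have hfun : (fun (d : PySem.Dict String (Option (List String))) base =>
      if PySem.Set.contains st.1 base then
        if pvIsHeater base then d.insert base (some ["temperature", "target"])
        else d.insert base none
      else
        let attrs := st.2.getD base PySem.Set.empty
        let attrs := if pvIsHeater base then PySem.Set.union attrs ["temperature", "target"] else attrs
        d.insert base (some (PySem.List.sorted attrs (fun x => x) false)))
      = (fun (d : PySem.Dict String (Option (List String))) b => d.insert b (pvEmit l b)) := by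
    funext d b
    have hany : pairs.any (pvWholeP b) = (l.filter (fun e => e.1 == b)).any (fun e => e.2.isNone) := by
      rw [List.any_filter]
      exact hperm.any_eq.symm
    have hc : PySem.Set.contains st.1 b = (l.filter (fun e => e.1 == b)).any (fun e => e.2.isNone) := by
      rw [← hany, Bool.eq_iff_iff, PySem.Set.contains_iff]
      exact h1 b
    unfold pvEmit
    by_cases hcb : PySem.Set.contains st.1 b = true
    · rw [if_pos hcb, if_pos (hc.symm.trans hcb)]
      split_ifs <;> rfl
    · have hcb' : PySem.Set.contains st.1 b = false := by simpa using hcb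
      rw [hcb']
      rw [hc] at hcb'
      rw [if_neg (by simp [hcb'])]
      simp only [Bool.false_eq_true, if_false]
      have hmem : ∀ x, x ∈ st.2.getD b PySem.Set.empty ↔ x ∈ PySem.Set.ofList (pvAttrs l b) := by
        intro x
        rw [h2 b, PySem.Set.mem_ofList, PySem.Set.mem_ofList]
        have : (pvAttrs pairs b).Perm (pvAttrs l b) :=
          ((hperm.filter _).filterMap _).symm
        exact this.mem_iff
      have hnd1 : (st.2.getD b PySem.Set.empty).Nodup := by
        rw [h2 b]; exact PySem.Set.nodup_ofList _
      have hnd2 : (PySem.Set.ofList (pvAttrs l b)).Nodup := PySem.Set.nodup_ofList _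
      have hperm2 : (st.2.getD b PySem.Set.empty).Perm (PySem.Set.ofList (pvAttrs l b)) :=
        (List.perm_ext_iff_of_nodup hnd1 hnd2).mpr hmem
      have hs1 : PySem.List.sorted (st.2.getD b PySem.Set.empty) (fun x => x) false
          = PySem.List.sorted (PySem.Set.ofList (pvAttrs l b)) (fun x => x) false :=
        (PySem.List.sorted_id_eq_sorted_id_iff_perm _ _).mpr hperm2
      have hperm3 : (PySem.Set.union (st.2.getD b PySem.Set.empty) ["temperature", "target"]).Perm
          (PySem.Set.union (PySem.Set.ofList (pvAttrs l b)) ["temperature", "target"]) := by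
        rw [List.perm_ext_iff_of_nodup (PySem.Set.nodup_union _ _ hnd1)
          (PySem.Set.nodup_union _ _ hnd2)]
        intro x
        rw [PySem.Set.mem_union, PySem.Set.mem_union]
        exact or_congr (hmem x) Iff.rfl
      have hs2 : PySem.List.sorted (PySem.Set.union (st.2.getD b PySem.Set.empty)
            ["temperature", "target"]) (fun x => x) false
          = PySem.List.sorted (PySem.Set.union (PySem.Set.ofList (pvAttrs l b))
            ["temperature", "target"]) (fun x => x) false :=
        (PySem.List.sorted_id_eq_sorted_id_iff_perm _ _).mpr hperm3
      simp only [hcb', Bool.false_eq_true, if_false]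
      by_cases hh : pvIsHeater b = true
      · simp only [hh, if_true]
        rw [hs2]
      · simp only [hh, Bool.false_eq_true, if_false]
        rw [hs1]
  simp only []
  rw [hbases, hfun, ← pvLoopB_eq l hpw]
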